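-- pv_equiv track=rewrite | github.com/rajatsainju2025/autorag-live | autorag_live/augment/synthesis.py | _parse_claims
-- ===== SOURCE A (Python) =====
-- from typing import Any, Dict, List, Optional, Protocol, Tuple
--
-- def _parse_claims(response: str) -> List[str]:
--     """Parse claims from LLM response."""
--     claims = []
--     for line in response.split("\n"):
--         line = line.strip()
--         if line.startswith("-"):
--             claim = line[1:].strip()
--             if claim:
--                 claims.append(claim)
--     return claims
-- ===== SOURCE B (Python) =====
-- def _parse_claims(response):
--     """Parse claims from LLM response (single left-to-right scan, no split/strip)."""
--     claims = []
--     n = len(response)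
--     i = 0
--     while i <= n:
--         j = i
--         # skip leading in-line whitespace
--         while j < n and response[j] != "\n" and response[j].isspace():
--             j += 1
--         if j < n and response[j] == "-":
--             j += 1
--             while j < n and response[j] != "\n" and response[j].isspace():
--                 j += 1
--             start = j
--             end = j  # one past the last non-whitespace char seen
--             while j < n and response[j] != "\n":
--                 if not response[j].isspace():
--                     end = j + 1
--                 j += 1
--             if end > start:
--                 claims.append(response[start:end])
--             i = j + 1
--         else:
--             while j < n and response[j] != "\n":
--                 j += 1
--             i = j + 1
--     return claims
-- ===== Notes on version B (the rewrite author's own statement) =====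
-- stated objective: alternative
-- what changed: Replaced the split-into-lines loop with per-line strip/startswith/strip by a single left-to-right index scan over the raw string that skips in-line whitespace, matches one dash, tracks the trailing-strip boundary, and emits each claim as one substring.
import Mathlib
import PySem

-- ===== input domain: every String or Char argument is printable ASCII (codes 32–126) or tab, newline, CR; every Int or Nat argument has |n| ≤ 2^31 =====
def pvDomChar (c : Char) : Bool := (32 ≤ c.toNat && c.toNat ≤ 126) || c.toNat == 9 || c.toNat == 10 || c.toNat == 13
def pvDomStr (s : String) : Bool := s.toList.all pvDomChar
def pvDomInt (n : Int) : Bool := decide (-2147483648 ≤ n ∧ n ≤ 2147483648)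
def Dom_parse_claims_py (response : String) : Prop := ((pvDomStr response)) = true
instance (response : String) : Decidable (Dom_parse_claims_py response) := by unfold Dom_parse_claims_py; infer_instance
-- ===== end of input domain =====

-- B re-implements the line-splitting parser as a single left-to-right scan over the
-- characters (alternative decomposition, same O(n) cost); return values proved equal.


-- ===== PORT A =====
-- literal port of A: split on "\n", strip each line, keep stripped text after a leading dash
def parse_claims_py (response : String) : List String :=
  ((PySem.Chars.splitOn response.toList ['\n']).map String.ofList).foldl
    (fun claims line =>
      let line := PySem.Str.strip line
      if PySem.Str.startswith line "-" then
        let claim := PySem.Str.strip (PySem.Str.slice line (some 1) none)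
        if claim ≠ "" then claims ++ [claim] else claims
      else claims) []

-- ===== PORT B =====
-- in-line whitespace: `response[j] != "\n" and response[j].isspace()`
def pvLineWS (c : Char) : Bool := c != '\n' && PySem.Chars.isspace c

-- the `while j < n and response[j] != "\n": j += 1` loop, then `i = j + 1` (none = end of string)
def pvSkipLine : List Char → Option (List Char)
  | [] => none
  | c :: cs => if c = '\n' then some cs else pvSkipLine cs

-- the body loop tracking `end` (trailing strip): returns (claim chars, rest after "\n")
def pvScanBody : List Char → List Char × Option (List Char)
  | [] => ([], none)
  | c :: cs =>
    if c = '\n' then ([], some cs)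
    else
      let (b, r) := pvScanBody cs
      if b.isEmpty && PySem.Chars.isspace c then ([], r) else (c :: b, r)

-- the outer `while i <= n` loop; fuel bounds the number of iterations (one per line)
def pvParseBF : Nat → List Char → List String
  | 0, _ => []
  | fuel+1, l =>
    let l1 := l.dropWhile pvLineWS
    if l1.head? = some '-' then
      match pvScanBody (l1.tail.dropWhile pvLineWS) with
      | (b, some r) => (if b.isEmpty then [] else [String.ofList b]) ++ pvParseBF fuel r
      | (b, none) => if b.isEmpty then [] else [String.ofList b]
    else
      match pvSkipLine l1 with
      | some r => pvParseBF fuel r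
      | none => []

def parse_claims_py_alt (response : String) : List String :=
  pvParseBF (response.toList.length + 1) response.toList

-- ===== PRECONDITION & SPEC =====
def Spec_parse_claims_py (response : String) (out : List String) : Prop := out = parse_claims_py_alt response
instance (response : String) (out : List String) : Decidable (Spec_parse_claims_py response out) := by unfold Spec_parse_claims_py; infer_instance

-- ===== CLAIM (what is proved, stated in full; the proofs are below) =====
def Claim_equal_parse_claims_py : Prop := ∀ (response : String), Dom_parse_claims_py response → Spec_parse_claims_py response (parse_claims_py response)

-- ===== LEMMAS AND PROOFS =====

-- per-line result (shared normal form of both programs)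
def pvLineClaim (cs : List Char) : List String :=
  if PySem.Chars.startswith (PySem.Chars.strip cs) ['-'] then
    let c := PySem.Chars.strip ((PySem.Chars.strip cs).drop 1)
    if c.isEmpty then [] else [String.ofList c]
  else []

def pvSplitAux (cur : List Char) : List Char → List (List Char)
  | [] => [cur.reverse]
  | c :: rest => if c = '\n' then cur.reverse :: pvSplitAux [] rest else pvSplitAux (c :: cur) rest

theorem pvSplitAux_no_nl (cur : List Char) (a : List Char) (h : '\n' ∉ a) :
    pvSplitAux cur a = [cur.reverse ++ a] := by
  induction a generalizing cur with
  | nil => simp [pvSplitAux]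
  | cons c rest ih =>
    simp only [List.mem_cons, not_or] at h
    simp [pvSplitAux, Ne.symm h.1, ih _ h.2]

theorem pvSplitAux_nl (cur a b : List Char) (h : '\n' ∉ a) :
    pvSplitAux cur (a ++ '\n' :: b) = (cur.reverse ++ a) :: pvSplitAux [] b := by
  induction a generalizing cur with
  | nil => simp [pvSplitAux]
  | cons c rest ih =>
    simp only [List.mem_cons, not_or] at h
    simp [pvSplitAux, Ne.symm h.1, ih _ h.2]

theorem pvGo_spec (fuel : Nat) : ∀ (l cur : List Char) (acc : List (List Char)), l.length ≤ fuel →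
    PySem.Chars.splitOn.go ['\n'] fuel l cur acc = acc.reverse ++ pvSplitAux cur l := by
  induction fuel with
  | zero =>
    intro l cur acc h
    have : l = [] := List.length_eq_zero_iff.mp (Nat.le_zero.mp h)
    subst this
    simp [PySem.Chars.splitOn.go, pvSplitAux]
  | succ n ih =>
    intro l cur acc h
    cases l with
    | nil => simp [PySem.Chars.splitOn.go, pvSplitAux]
    | cons c rest =>
      simp only [List.length_cons, Nat.add_le_add_iff_right] at h
      by_cases hc : c = '\n'
      · subst hc
        rw [PySem.Chars.splitOn.go]
        simp [List.isPrefixOf, ih _ _ _ h, pvSplitAux]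
      · rw [PySem.Chars.splitOn.go]
        simp only [List.isPrefixOf, Bool.and_eq_true, beq_iff_eq]
        rw [if_neg (by simp [Ne.symm hc])]
        simp [ih _ _ _ h, pvSplitAux, hc]

theorem pvSplitOn_eq (l : List Char) : PySem.Chars.splitOn l ['\n'] = pvSplitAux [] l := by
  rw [PySem.Chars.splitOn, pvGo_spec _ _ _ _ (Nat.le_succ_of_le (Nat.le_refl _))]
  simp

-- basic whitespace facts
theorem pvLineWS_eq (c : Char) (h : c ≠ '\n') : pvLineWS c = PySem.Chars.isspace c := by
  simp [pvLineWS, h]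

theorem pvLineWS_nl : pvLineWS '\n' = false := by decide

theorem pv_isspace_dash : PySem.Chars.isspace '-' = false := by decide

-- dropWhile pvLineWS = lstrip on newline-free strings
theorem pvDropWhile_no_nl (a : List Char) (h : '\n' ∉ a) :
    a.dropWhile pvLineWS = PySem.Chars.lstrip a := by
  unfold PySem.Chars.lstrip
  induction a with
  | nil => rfl
  | cons c rest ih =>
    simp only [List.mem_cons, not_or] at h
    rw [List.dropWhile_cons, List.dropWhile_cons, pvLineWS_eq c (Ne.symm h.1), ih h.2]

theorem pvDropWhile_append (a b : List Char) :
    (a ++ '\n' :: b).dropWhile pvLineWS = a.dropWhile pvLineWS ++ '\n' :: b := by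
  rw [List.dropWhile_append]
  split_ifs with h
  · rw [List.isEmpty_iff] at h
    rw [h, List.dropWhile_cons, pvLineWS_nl]
    simp
  · rfl

theorem pvSkipLine_no_nl (a : List Char) (h : '\n' ∉ a) : pvSkipLine a = none := by
  induction a with
  | nil => rfl
  | cons c rest ih =>
    simp only [List.mem_cons, not_or] at h
    rw [pvSkipLine, if_neg (Ne.symm h.1), ih h.2]

theorem pvSkipLine_append (a b : List Char) (h : '\n' ∉ a) :
    pvSkipLine (a ++ '\n' :: b) = some b := by
  induction a with
  | nil => simp [pvSkipLine]
  | cons c rest ih =>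
    simp only [List.mem_cons, not_or] at h
    rw [List.cons_append, pvSkipLine, if_neg (Ne.symm h.1), ih h.2]

-- rstrip recursion
theorem pvRstrip_nil : PySem.Chars.rstrip [] = [] := rfl

theorem pvRstrip_cons (c : Char) (l : List Char) :
    PySem.Chars.rstrip (c :: l)
      = if (PySem.Chars.rstrip l).isEmpty && PySem.Chars.isspace c then []
        else c :: PySem.Chars.rstrip l := by
  unfold PySem.Chars.rstrip
  rw [List.reverse_cons, List.dropWhile_append]
  by_cases hP : (List.dropWhile PySem.Chars.isspace l.reverse).isEmpty = true
  · rw [if_pos hP]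
    simp only [List.isEmpty_iff] at hP
    simp only [hP, List.dropWhile_cons, List.dropWhile_nil, List.reverse_nil, List.isEmpty_nil,
      Bool.true_and]
    by_cases hc : PySem.Chars.isspace c = true
    · simp [hc]
    · simp [hc]
  · rw [if_neg hP]
    simp only [List.isEmpty_iff] at hP
    have h2 : ((List.dropWhile PySem.Chars.isspace l.reverse).reverse).isEmpty = false := by
      simp [List.isEmpty_iff, hP]
    simp [h2]

theorem pvScanBody_no_nl (a : List Char) (h : '\n' ∉ a) :
    pvScanBody a = (PySem.Chars.rstrip a, none) := by
  induction a with
  | nil => rfl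
  | cons c rest ih =>
    simp only [List.mem_cons, not_or] at h
    rw [pvScanBody, if_neg (Ne.symm h.1), ih h.2]
    simp only [pvRstrip_cons c rest]
    by_cases hc : ((PySem.Chars.rstrip rest).isEmpty && PySem.Chars.isspace c) = true
    · simp [hc]
    · simp [hc]

theorem pvScanBody_append (a b : List Char) (h : '\n' ∉ a) :
    pvScanBody (a ++ '\n' :: b) = (PySem.Chars.rstrip a, some b) := by
  induction a with
  | nil => simp [pvScanBody, pvRstrip_nil]
  | cons c rest ih =>
    simp only [List.mem_cons, not_or] at h
    rw [List.cons_append, pvScanBody, if_neg (Ne.symm h.1), ih h.2]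
    simp only [pvRstrip_cons c rest]
    by_cases hc : ((PySem.Chars.rstrip rest).isEmpty && PySem.Chars.isspace c) = true
    · simp [hc]
    · simp [hc]

theorem pvLstrip_nil_of_rstrip_nil (l : List Char) (h : PySem.Chars.rstrip l = []) :
    PySem.Chars.lstrip l = [] := by
  unfold PySem.Chars.rstrip at h
  unfold PySem.Chars.lstrip
  rw [List.reverse_eq_nil_iff, List.dropWhile_eq_nil_iff] at h
  rw [List.dropWhile_eq_nil_iff]
  intro x hx
  exact h x (List.mem_reverse.mpr hx)

theorem pvLstrip_rstrip_comm (l : List Char) :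
    PySem.Chars.lstrip (PySem.Chars.rstrip l) = PySem.Chars.rstrip (PySem.Chars.lstrip l) := by
  induction l with
  | nil => rfl
  | cons c rest ih =>
    by_cases hc : PySem.Chars.isspace c = true
    · rw [pvRstrip_cons]
      by_cases he : (PySem.Chars.rstrip rest).isEmpty = true
      · rw [List.isEmpty_iff] at he
        simp only [he, List.isEmpty_nil, hc, Bool.and_self, if_pos]
        have h1 : PySem.Chars.lstrip (c :: rest) = PySem.Chars.lstrip rest := by
          unfold PySem.Chars.lstrip
          rw [List.dropWhile_cons, if_pos hc]
        rw [h1, pvLstrip_nil_of_rstrip_nil rest he]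
        rfl
      · simp only [he, Bool.false_and, if_neg Bool.false_ne_true]
        have h1 : PySem.Chars.lstrip (c :: PySem.Chars.rstrip rest)
            = PySem.Chars.lstrip (PySem.Chars.rstrip rest) := by
          unfold PySem.Chars.lstrip
          rw [List.dropWhile_cons, if_pos hc]
        have h2 : PySem.Chars.lstrip (c :: rest) = PySem.Chars.lstrip rest := by
          unfold PySem.Chars.lstrip
          rw [List.dropWhile_cons, if_pos hc]
        rw [h1, h2, ih]
    · have h1 : PySem.Chars.lstrip (c :: rest) = c :: rest := by
        unfold PySem.Chars.lstrip
        rw [List.dropWhile_cons, if_neg hc]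
      rw [h1, pvRstrip_cons]
      simp only [hc, Bool.and_false, if_neg Bool.false_ne_true]
      have h2 : PySem.Chars.lstrip (c :: PySem.Chars.rstrip rest) = c :: PySem.Chars.rstrip rest := by
        unfold PySem.Chars.lstrip
        rw [List.dropWhile_cons, if_neg hc]
      rw [h2]

theorem pvDropWhile_idem {p : Char → Bool} (l : List Char) :
    List.dropWhile p (List.dropWhile p l) = List.dropWhile p l := by
  induction l with
  | nil => rfl
  | cons c rest ih =>
    rw [List.dropWhile_cons]
    by_cases hc : p c = true
    · simp [hc, ih]
    · simp [List.dropWhile_cons, hc]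

theorem pvRstrip_idem (l : List Char) :
    PySem.Chars.rstrip (PySem.Chars.rstrip l) = PySem.Chars.rstrip l := by
  unfold PySem.Chars.rstrip
  rw [List.reverse_reverse, pvDropWhile_idem]

theorem pvHead_dropWhile {p : Char → Bool} {l rest : List Char} {c : Char}
    (h : l.dropWhile p = c :: rest) : p c = false := by
  induction l with
  | nil => simp at h
  | cons d tl ih =>
    rw [List.dropWhile_cons] at h
    by_cases hd : p d = true
    · rw [if_pos hd] at h; exact ih h
    · rw [if_neg hd] at h
      cases h
      simpa using hd

theorem pvMem_lstrip {l : List Char} {c : Char} (h : c ∉ l) : c ∉ PySem.Chars.lstrip l :=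
  fun hm => h ((List.dropWhile_sublist _).subset hm)

theorem pvStrip_rstrip' (l : List Char) :
    PySem.Chars.strip (PySem.Chars.rstrip l) = PySem.Chars.strip l := by
  unfold PySem.Chars.strip
  rw [pvLstrip_rstrip_comm, pvRstrip_idem]

theorem pvLineClaim_of_lstrip_nil {a : List Char} (hl : PySem.Chars.lstrip a = []) :
    pvLineClaim a = [] := by
  simp [pvLineClaim, PySem.Chars.strip, hl, pvRstrip_nil, PySem.Chars.startswith, List.isPrefixOf]

theorem pvLineClaim_of_lstrip_dash {a rest : List Char} (hl : PySem.Chars.lstrip a = '-' :: rest) :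
    pvLineClaim a = (if (PySem.Chars.strip rest).isEmpty then []
      else [String.ofList (PySem.Chars.strip rest)]) := by
  have hs : PySem.Chars.strip a = '-' :: PySem.Chars.rstrip rest := by
    rw [PySem.Chars.strip, hl, pvRstrip_cons]
    simp [pv_isspace_dash]
  simp only [pvLineClaim, hs, PySem.Chars.startswith, List.isPrefixOf, List.drop_succ_cons,
    List.drop_zero, beq_self_eq_true, Bool.true_and]
  rw [if_pos (by simp)]
  rw [pvStrip_rstrip']

theorem pvLineClaim_of_lstrip_other {a rest : List Char} {c : Char}
    (hl : PySem.Chars.lstrip a = c :: rest) (hc : c ≠ '-') : pvLineClaim a = [] := by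
  have hsp : PySem.Chars.isspace c = false := pvHead_dropWhile hl
  have hs : PySem.Chars.strip a = c :: PySem.Chars.rstrip rest := by
    rw [PySem.Chars.strip, hl, pvRstrip_cons]
    simp [hsp]
  simp [pvLineClaim, hs, PySem.Chars.startswith, List.isPrefixOf, Ne.symm hc]

theorem pvParseB_no_nl (fuel : Nat) (a : List Char) (h : '\n' ∉ a) :
    pvParseBF (fuel+1) a = pvLineClaim a := by
  simp only [pvParseBF]
  rw [pvDropWhile_no_nl a h]
  cases hl : PySem.Chars.lstrip a with
  | nil =>
    simp only [List.head?_nil, reduceCtorEq, if_neg]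
    simp [pvSkipLine, pvLineClaim_of_lstrip_nil hl]
  | cons c rest =>
    have hnr : '\n' ∉ c :: rest := hl ▸ pvMem_lstrip h
    simp only [List.mem_cons, not_or] at hnr
    by_cases hc : c = '-'
    · subst hc
      simp only [List.head?_cons, if_pos rfl, List.tail_cons]
      rw [pvDropWhile_no_nl rest hnr.2, pvScanBody_no_nl _ (pvMem_lstrip hnr.2)]
      rw [pvLineClaim_of_lstrip_dash hl]
      have : PySem.Chars.rstrip (PySem.Chars.lstrip rest) = PySem.Chars.strip rest := rfl
      rw [this]
      split_ifs with h1 <;> simp_all [List.isEmpty_iff]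
    · rw [if_neg (by simp [hc])]
      rw [pvSkipLine_no_nl _ (hl ▸ pvMem_lstrip h)]
      exact (pvLineClaim_of_lstrip_other hl hc).symm

theorem pvParseB_step (fuel : Nat) (a b : List Char) (h : '\n' ∉ a) :
    pvParseBF (fuel+1) (a ++ '\n' :: b) = pvLineClaim a ++ pvParseBF fuel b := by
  simp only [pvParseBF]
  rw [pvDropWhile_append, pvDropWhile_no_nl a h]
  cases hl : PySem.Chars.lstrip a with
  | nil =>
    simp only [List.nil_append, List.head?_cons]
    rw [if_neg (by decide)]
    simp [pvSkipLine, pvLineClaim_of_lstrip_nil hl]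
  | cons c rest =>
    have hnr : '\n' ∉ c :: rest := hl ▸ pvMem_lstrip h
    simp only [List.mem_cons, not_or] at hnr
    by_cases hc : c = '-'
    · subst hc
      simp only [List.cons_append, List.head?_cons, if_pos rfl, List.tail_cons]
      rw [pvDropWhile_append, pvDropWhile_no_nl rest hnr.2,
        pvScanBody_append _ _ (pvMem_lstrip hnr.2)]
      rw [pvLineClaim_of_lstrip_dash hl]
      have : PySem.Chars.rstrip (PySem.Chars.lstrip rest) = PySem.Chars.strip rest := rfl
      rw [this]
      split_ifs with h1 <;> simp_all [List.isEmpty_iff]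
    · simp only [List.cons_append, List.head?_cons]
      rw [if_neg (by simp [hc])]
      rw [show c :: (rest ++ '\n' :: b) = (c :: rest) ++ '\n' :: b by simp,
        pvSkipLine_append _ _ (hl ▸ pvMem_lstrip h)]
      rw [pvLineClaim_of_lstrip_other hl hc]
      rfl

theorem pvFirstNl {l : List Char} (h : '\n' ∈ l) :
    ∃ a b, l = a ++ '\n' :: b ∧ '\n' ∉ a := by
  induction l with
  | nil => simp at h
  | cons c rest ih =>
    by_cases hc : c = '\n'
    · exact ⟨[], rest, by simp [hc], by simp⟩
    · have : '\n' ∈ rest := by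
        rcases List.mem_cons.mp h with h1 | h1
        · exact absurd h1.symm hc
        · exact h1
      obtain ⟨a, b, rfl, hna⟩ := ih this
      exact ⟨c :: a, b, rfl, by simp [Ne.symm hc, hna]⟩

theorem pvMain (fuel : Nat) : ∀ (l : List Char), l.count '\n' < fuel →
    pvParseBF fuel l = (pvSplitAux [] l).flatMap pvLineClaim := by
  induction fuel with
  | zero => intro l h; omega
  | succ n ih =>
    intro l h
    by_cases hm : '\n' ∈ l
    · obtain ⟨a, b, rfl, hna⟩ := pvFirstNl hm
      have hca : a.count '\n' = 0 := List.count_eq_zero.mpr hna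
      have hcb : b.count '\n' < n := by
        rw [List.count_append, List.count_cons] at h
        simp [hca] at h
        omega
      rw [pvParseB_step n a b hna, pvSplitAux_nl [] a b hna, ih b hcb]
      simp
    · rw [pvParseB_no_nl n l hm, pvSplitAux_no_nl [] l hm]
      simp

theorem pvStep_eq (acc : List String) (cs : List Char) :
    (if PySem.Str.startswith (PySem.Str.strip (String.ofList cs)) "-" = true then
       if PySem.Str.strip (PySem.Str.slice (PySem.Str.strip (String.ofList cs)) (some 1) none) ≠ "" then
         acc ++ [PySem.Str.strip (PySem.Str.slice (PySem.Str.strip (String.ofList cs)) (some 1) none)]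
       else acc
     else acc) = acc ++ pvLineClaim cs := by
  have h1 : PySem.Str.strip (String.ofList cs) = String.ofList (PySem.Chars.strip cs) := by
    simp [PySem.Str.strip]
  have hsl : PySem.Str.slice (String.ofList (PySem.Chars.strip cs)) (some 1) none
      = String.ofList ((PySem.Chars.strip cs).drop 1) := by
    simp [PySem.Str.slice, PySem.List.slice_from _ (by norm_num : (0:Int) ≤ 1)]
  have h2 : PySem.Str.strip (String.ofList ((PySem.Chars.strip cs).drop 1))
      = String.ofList (PySem.Chars.strip ((PySem.Chars.strip cs).drop 1)) := by
    simp [PySem.Str.strip]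
  have hsw : PySem.Str.startswith (String.ofList (PySem.Chars.strip cs)) "-"
      = PySem.Chars.startswith (PySem.Chars.strip cs) ['-'] := by
    simp [PySem.Str.startswith]
  have hne : ∀ x : List Char, (String.ofList x ≠ "") ↔ ¬ x.isEmpty := by
    intro x
    constructor
    · intro h hx; exact h (by cases x with | nil => rfl | cons => simp at hx)
    · intro h hx
      apply h
      have := congrArg String.toList hx
      simp at this
      simp [this]
  simp only [h1, hsw, hsl, h2, pvLineClaim]
  by_cases hb : PySem.Chars.startswith (PySem.Chars.strip cs) ['-'] = true
  · simp only [hb, if_pos]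
    split_ifs <;> simp_all [List.isEmpty_iff]
  · simp [hb]

theorem pvFold_eq (lines : List (List Char)) (acc : List String) :
    (lines.map String.ofList).foldl
      (fun claims line =>
        let line := PySem.Str.strip line
        if PySem.Str.startswith line "-" then
          let claim := PySem.Str.strip (PySem.Str.slice line (some 1) none)
          if claim ≠ "" then claims ++ [claim] else claims
        else claims) acc = acc ++ lines.flatMap pvLineClaim := by
  induction lines generalizing acc with
  | nil => simp
  | cons cs rest ih =>
    simp only [List.map_cons, List.foldl_cons, List.flatMap_cons]
    rw [pvStep_eq, ih, List.append_assoc]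

theorem pvMain' (l : List Char) :
    pvParseBF (l.length + 1) l = (pvSplitAux [] l).flatMap pvLineClaim :=
  pvMain _ l (Nat.lt_succ_of_le (List.count_le_length))

-- ===== VERDICT (by name: the statement is the Claim_ definition above) =====
theorem parse_claims_py_spec : Claim_equal_parse_claims_py := by
  intro response _dom
  unfold Spec_parse_claims_py
  unfold parse_claims_py parse_claims_py_alt
  rw [pvSplitOn_eq, pvFold_eq, pvMain']
  simp
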